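-- pv_equiv track=rewrite | github.com/nexio-humro/nlp_demo | chatbot_united/brain_english/filters.py | trim_length
-- ===== SOURCE A (Python) =====
-- def trim_length(filtered_article):
--     sentences_splitted = filtered_article.split(".")
--     total_words = 0
--     article_ordered = ''
--
--     for sentence in sentences_splitted:
--         if total_words < 5:
--             words = sentence.split(" ")
--             total_words = total_words + len(words)
--             article_ordered+=sentence
--             article_ordered+='.'
--
--     return article_ordered
-- ===== SOURCE B (Python) =====
-- def trim_length(filtered_article):
--     sentences = filtered_article.split(".")
--     wc = [len(s.split(" ")) for s in sentences]
--     prefix = [0]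
--     for w in wc:
--         prefix.append(prefix[-1] + w)
--     k = sum(1 for p in prefix[:-1] if p < 5)
--     return "".join(s + "." for s in sentences[:k])
-- ===== Notes on version B (the rewrite author's own statement) =====
-- stated objective: alternative
-- what changed: Replaces A's mutable running-total/string-accumulator loop by an index-then-select decomposition: compute per-sentence word counts, their exclusive prefix sums, count how many leading sentences start below 5 accumulated words, then slice those sentences and join them, appending the sentence terminator to each.
import Mathlib
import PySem

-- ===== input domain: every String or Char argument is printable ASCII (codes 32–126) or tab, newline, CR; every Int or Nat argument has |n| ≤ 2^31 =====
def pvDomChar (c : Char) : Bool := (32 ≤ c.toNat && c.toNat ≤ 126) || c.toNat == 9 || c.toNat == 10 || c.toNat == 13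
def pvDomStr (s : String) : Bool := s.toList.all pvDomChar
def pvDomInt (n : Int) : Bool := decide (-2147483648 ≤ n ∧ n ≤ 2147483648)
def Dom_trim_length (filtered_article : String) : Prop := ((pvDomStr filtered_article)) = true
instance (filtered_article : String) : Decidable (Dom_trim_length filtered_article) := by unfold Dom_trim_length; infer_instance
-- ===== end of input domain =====

-- B replaces A's mutable-accumulator loop by an index-then-select decomposition
-- (word counts, exclusive prefix sums, select leading sentences, join); objective: alternative.

-- ===== PORT A =====
def trim_length (filtered_article : String) : String :=
  let sentences_splitted := PySem.Chars.splitOn filtered_article.toList ['.']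
  let r := sentences_splitted.foldl
    (fun (st : Int × List Char) sentence =>
      if st.1 < 5 then
        let words := PySem.Chars.splitOn sentence [' ']
        (st.1 + (words.length : Int), st.2 ++ sentence ++ ['.'])
      else st)
    (0, [])
  String.ofList r.2

-- ===== PORT B =====
def trim_length_alt (filtered_article : String) : String :=
  let sentences := PySem.Chars.splitOn filtered_article.toList ['.']
  let wc := sentences.map (fun s => ((PySem.Chars.splitOn s [' ']).length : Int))
  let pre := wc.foldl (fun pre w => pre ++ [PySem.List.pyGetD pre (-1) 0 + w]) [(0 : Int)]
  let k : Int := (PySem.List.slice pre none (some (-1))).foldl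
      (fun acc p => if p < 5 then acc + 1 else acc) 0
  String.ofList
    (PySem.Chars.join [] ((PySem.List.slice sentences none (some k)).map (fun s => s ++ ['.'])))

-- ===== PRECONDITION & SPEC =====
def Spec_trim_length (filtered_article : String) (out : String) : Prop := out = trim_length_alt filtered_article
instance (filtered_article : String) (out : String) : Decidable (Spec_trim_length filtered_article out) := by unfold Spec_trim_length; infer_instance

-- ===== CLAIM (what is proved, stated in full; the proofs are below) =====
def Claim_equal_trim_length : Prop := ∀ (filtered_article : String), Dom_trim_length filtered_article → Spec_trim_length filtered_article (trim_length filtered_article)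

-- ===== LEMMAS AND PROOFS =====

-- exclusive prefix sums of ws starting at t
def pvEpfx (t : Int) : List Int → List Int
  | [] => []
  | w :: r => t :: pvEpfx (t + w) r

-- inclusive prefix list (what Source B's `prefix` holds)
def pvPfx (t : Int) : List Int → List Int
  | [] => [t]
  | w :: r => t :: pvPfx (t + w) r

-- number of leading weights kept when the running total starts at t
def pvK (t : Int) : List Int → Nat
  | [] => 0
  | w :: r => if t < 5 then pvK (t + w) r + 1 else 0

theorem pvPfx_ne_nil (t : Int) (ws : List Int) : pvPfx t ws ≠ [] := by
  cases ws <;> simp [pvPfx]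

theorem pvFold_pfx (ws : List Int) (acc : List Int) (t : Int) :
    ws.foldl (fun pre w => pre ++ [PySem.List.pyGetD pre (-1) 0 + w]) (acc ++ [t])
      = acc ++ pvPfx t ws := by
  induction ws generalizing acc t with
  | nil => simp [pvPfx]
  | cons w r ih =>
      simp only [List.foldl_cons, PySem.List.pyGetD_neg_one_append_singleton, pvPfx]
      have := ih (acc ++ [t]) (t + w)
      simpa [List.append_assoc] using this

theorem pvDropLast_pfx (t : Int) (ws : List Int) :
    (pvPfx t ws).dropLast = pvEpfx t ws := by
  induction ws generalizing t with
  | nil => simp [pvPfx, pvEpfx]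
  | cons w r ih =>
      have h := pvPfx_ne_nil (t + w) r
      simp [pvPfx, pvEpfx, List.dropLast_cons_of_ne_nil h, ih]

theorem pvMem_epfx_ge (t x : Int) (ws : List Int) (hw : ∀ w ∈ ws, 0 ≤ w)
    (hx : x ∈ pvEpfx t ws) : t ≤ x := by
  induction ws generalizing t with
  | nil => simp [pvEpfx] at hx
  | cons w r ih =>
      simp [pvEpfx] at hx
      rcases hx with rfl | hx
      · exact le_refl x
      · have h0 : 0 ≤ w := hw w (by simp)
        have := ih (t + w) (fun v hv => hw v (by simp [hv])) hx
        omega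

theorem pvCount_epfx (ws : List Int) (t : Int) (hw : ∀ w ∈ ws, 0 ≤ w) :
    (pvEpfx t ws).countP (fun p => decide (p < 5)) = pvK t ws := by
  induction ws generalizing t with
  | nil => simp [pvEpfx, pvK]
  | cons w r ih =>
      by_cases h : t < 5
      · simp [pvEpfx, pvK, h, 
          ih (t + w) (fun v hv => hw v (by simp [hv]))]
      · have hz : (pvEpfx (t + w) r).countP (fun p => decide (p < 5)) = 0 := by
          rw [List.countP_eq_zero]
          intro x hx
          have h0 : 0 ≤ w := hw w (by simp)
          have := pvMem_epfx_ge (t + w) x r (fun v hv => hw v (by simp [hv])) hx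
          simp; omega
        simp [pvEpfx, pvK, h, hz]

-- word count of one sentence
def pvF (s : List Char) : Int := ((PySem.Chars.splitOn s [' ']).length : Int)

theorem pvJoin_nil (xs : List (List Char)) :
    PySem.Chars.join [] xs = xs.flatten := by
  induction xs with
  | nil => simp [PySem.Chars.join, List.intercalate]
  | cons a r ih =>
      cases r with
      | nil => simp [PySem.Chars.join, List.intercalate]
      | cons b s => simpa [PySem.Chars.join_cons_cons] using ih

theorem pvK_of_ge (t : Int) (h : ¬ t < 5) (l : List (List Char)) :
    pvK t (l.map pvF) = 0 := by
  cases l <;> simp [pvK, h]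

theorem pvFoldA (parts : List (List Char)) (t : Int) (acc : List Char) :
    (parts.foldl
      (fun (st : Int × List Char) sentence =>
        if st.1 < 5 then
          (st.1 + ((PySem.Chars.splitOn sentence [' ']).length : Int),
            st.2 ++ sentence ++ ['.'])
        else st)
      (t, acc)).2
      = acc ++ ((parts.take (pvK t (parts.map pvF))).map (fun s => s ++ ['.'])).flatten := by
  induction parts generalizing t acc with
  | nil => simp [pvK]
  | cons s r ih =>
      by_cases h : t < 5
      · simp only [List.foldl_cons, if_pos h]
        rw [ih]
        simp [pvK, pvF, h, List.append_assoc]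
      · simp only [List.foldl_cons, if_neg h]
        rw [ih]
        have h0 : pvK t ((s :: r).map pvF) = 0 := pvK_of_ge t h (s :: r)
        simp only [List.map_cons] at h0
        simp [h0, pvK_of_ge t h r]

theorem pvWc_nonneg (parts : List (List Char)) : ∀ w ∈ parts.map pvF, 0 ≤ w := by
  intro w hw
  simp [pvF] at hw
  obtain ⟨s, _, rfl⟩ := hw
  exact Int.natCast_nonneg _

-- ===== VERDICT (by name: the statement is the Claim_ definition above) =====
theorem trim_length_spec : Claim_equal_trim_length := by
  intro fa _
  unfold Spec_trim_length trim_length trim_length_alt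
  dsimp only
  set parts := PySem.Chars.splitOn fa.toList ['.'] with hparts
  have hwc : parts.map (fun s => ((PySem.Chars.splitOn s [' ']).length : Int))
      = parts.map pvF := by simp [pvF]
  rw [hwc]
  have hpre := pvFold_pfx (parts.map pvF) [] 0
  simp only [List.nil_append] at hpre
  rw [hpre]
  have hslice : PySem.List.slice (pvPfx 0 (parts.map pvF)) none (some (-1))
      = pvEpfx 0 (parts.map pvF) := by
    rw [PySem.List.slice_to_neg_one, pvDropLast_pfx]
  rw [hslice]
  have hk := PySem.List.foldl_ite_add_one (p := fun p : Int => p < 5)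
      (l := pvEpfx 0 (parts.map pvF)) (a := 0)
  rw [hk, pvCount_epfx _ _ (pvWc_nonneg parts)]
  have hkn : (0 : Int) + (pvK 0 (parts.map pvF) : Int) = ((pvK 0 (parts.map pvF) : Nat) : Int) := by
    omega
  rw [hkn, PySem.List.slice_to_natCast, pvJoin_nil, pvFoldA]
  simp
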